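-- pv_equiv track=rewrite | github.com/Nest05/codility-trials | codility_solution.py | solution
-- ===== SOURCE A (Python) =====
-- def solution(R, V):
--     initial_balance_A = 0
--     initial_balance_B = 0
--
--     # If there's only one transfer and it's 'B'
--     if R == 'B':
--         initial_balance_B = V[0]
--         return [initial_balance_B, 0]
--
--     # If transfers start with 'B'
--     if R[0] == 'B':
--         initial_balance_B = V[0]
--         for i in range(1, len(R)):
--             if R[i] == 'A':
--                 initial_balance_A = V[i]
--                 break
--             initial_balance_B += V[i]
--         return [initial_balance_B, initial_balance_A]
--     # If transfers start with 'A'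
--     else:
--         for i in range(len(R)):
--             if R[i] == 'B':
--                 initial_balance_B = V[i]
--                 break
--             initial_balance_A += V[i]
--         initial_balance_B += initial_balance_A
--         return [0, initial_balance_B]
-- ===== SOURCE B (Python) =====
-- def solution(R, V):
--     # single right-to-left pass with a reset at each opposite-letter position:
--     # after the pass, s is the sum of the leading run and b the value just after it
--     other = 'A' if R[0] == 'B' else 'B'
--     s = b = 0
--     for c, v in reversed(list(zip(R, V))):
--         if c == other:
--             s, b = 0, v
--         else:
--             s += v
--     if R[0] == 'B':
--         return [s, b]
--     return [0, s + b]
-- ===== Notes on version B (the rewrite author's own statement) =====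
-- stated objective: alternative
-- what changed: Replaces A's three forward accumulate-and-break loops by one uniform right-to-left fold over zip(R,V) that resets its accumulator at each opposite-letter position, so the leading run's sum and the boundary value fall out of the final state with no forward search and no break.
import Mathlib
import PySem

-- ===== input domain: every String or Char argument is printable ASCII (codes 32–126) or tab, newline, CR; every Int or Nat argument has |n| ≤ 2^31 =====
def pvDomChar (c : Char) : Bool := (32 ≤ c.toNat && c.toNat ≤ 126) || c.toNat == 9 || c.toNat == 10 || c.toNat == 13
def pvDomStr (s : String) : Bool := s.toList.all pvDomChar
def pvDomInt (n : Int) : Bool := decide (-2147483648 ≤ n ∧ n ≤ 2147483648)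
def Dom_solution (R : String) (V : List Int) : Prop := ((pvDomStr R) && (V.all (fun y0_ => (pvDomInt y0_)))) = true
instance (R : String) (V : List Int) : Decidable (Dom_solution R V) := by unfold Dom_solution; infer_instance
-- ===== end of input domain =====

-- B replaces A's forward accumulate-and-break loops by a single right-to-left
-- fold over zip(R,V) with a reset at each opposite-letter position; objective: alternative.


-- ===== PORT A =====
-- A's for-loops: index i walks the remaining characters; on the break character the
-- second component is set to V[i], otherwise V[i] is accumulated.  V accesses are
-- V.getD i 0; Pre_solution guarantees every accessed index is in range (Python raises
-- IndexError outside Pre_, where nothing is claimed).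
def pvLoop (V : List Int) (brk : Char) : Nat → List Char → Int → Int × Int
  | _, [], acc => (acc, 0)
  | i, c :: t, acc =>
      if c = brk then (acc, V.getD i 0) else pvLoop V brk (i + 1) t (acc + V.getD i 0)

def solution (R : String) (V : List Int) : List Int :=
  if R = "B" then [V.getD 0 0, 0]
  else if R.toList.headD ' ' = 'B' then
    let p := pvLoop V 'A' 1 (R.toList.drop 1) (V.getD 0 0)
    [p.1, p.2]
  else
    let p := pvLoop V 'B' 0 R.toList 0
    [0, p.1 + p.2]

-- ===== PORT B =====
-- Source B's reversed(list(zip(R, V))) loop is a foldl over the reversed zip list with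
-- state (s, b); R[0] is R.toList.headD ' ' (Python raises IndexError on empty R,
-- which Pre_solution excludes).
def solution_alt (R : String) (V : List Int) : List Int :=
  let other := if R.toList.headD ' ' = 'B' then 'A' else 'B'
  let p := ((R.toList.zip V).reverse).foldl
      (fun (sb : Int × Int) cv => if cv.1 = other then ((0 : Int), cv.2) else (sb.1 + cv.2, sb.2))
      ((0 : Int), (0 : Int))
  if R.toList.headD ' ' = 'B' then [p.1, p.2] else [0, p.1 + p.2]

-- ===== PRECONDITION & SPEC =====
-- Exactly the inputs on which A returns: R nonempty and V long enough to cover every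
-- index A's loop visits (up to the split index, capped at len(R)-1); elsewhere A
-- raises IndexError (at R[0] or at some V[i]).
def Pre_solution (R : String) (V : List Int) : Prop :=
  R.toList ≠ [] ∧
    min (if R.toList.headD ' ' = 'B' then 1 + R.toList.tail.findIdx (· = 'A')
         else R.toList.findIdx (· = 'B'))
        (R.toList.length - 1) < V.length
instance (R : String) (V : List Int) : Decidable (Pre_solution R V) := by
  unfold Pre_solution; infer_instance

def pvWitness_solution : String × List Int := ("BA", [3, 4])

def Spec_solution (R : String) (V : List Int) (out : List Int) : Prop := out = solution_alt R V
instance (R : String) (V : List Int) (out : List Int) : Decidable (Spec_solution R V out) := by unfold Spec_solution; infer_instance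

-- ===== CLAIM (what is proved, stated in full; the proofs are below) =====
def Claim_equal_solution : Prop := ∀ (R : String) (V : List Int), Dom_solution R V → Pre_solution R V → Spec_solution R V (solution R V)

-- ===== LEMMAS AND PROOFS =====

lemma take_succ_sum (V : List Int) (i j : Nat) :
    ((V.drop i).take (j + 1)).sum = V.getD i 0 + ((V.drop (i + 1)).take j).sum := by
  rcases h : V.drop i with _ | ⟨x, xs⟩
  · have h1 : V.length ≤ i := List.drop_eq_nil_iff.mp h
    have h2 : V.drop (i + 1) = [] := List.drop_eq_nil_iff.mpr (by omega)
    simp [h2, List.getD, List.getElem?_eq_none h1]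
  · have h0 : (V.drop i)[0]? = V[i + 0]? := List.getElem?_drop
    rw [h] at h0
    have hx : V[i]? = some x := by simpa using h0.symm
    have hxs : V.drop (i + 1) = xs := by
      have hdd : (V.drop i).drop 1 = V.drop (i + 1) := by rw [List.drop_drop]
      simpa [h] using hdd.symm
    simp [hxs, List.getD, hx]

lemma pvLoop_spec (V : List Int) (brk : Char) :
    ∀ (rest : List Char) (i : Nat) (acc : Int),
      pvLoop V brk i rest acc =
        (acc + ((V.drop i).take (rest.findIdx (· = brk))).sum,
         if rest.findIdx (· = brk) < rest.length
         then V.getD (i + rest.findIdx (· = brk)) 0 else 0) := by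
  intro rest
  induction rest with
  | nil => intro i acc; simp [pvLoop]
  | cons c t ih =>
    intro i acc
    by_cases h : c = brk
    · simp [pvLoop, h, List.findIdx_cons]
    · have hIdx : (c :: t).findIdx (· = brk) = t.findIdx (· = brk) + 1 := by
        simp [List.findIdx_cons, h]
      rw [pvLoop, if_neg h, ih, hIdx, Prod.mk.injEq]
      refine ⟨by rw [take_succ_sum]; ring, ?_⟩
      simp only [List.length_cons]
      rw [show i + 1 + t.findIdx (· = brk) = i + (t.findIdx (· = brk) + 1) from by omega]
      by_cases hlt : t.findIdx (· = brk) < t.length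
      · rw [if_pos hlt, if_pos (by omega)]
      · rw [if_neg hlt, if_neg (by omega)]

-- the right-to-left fold with reset, characterised over an arbitrary pair list
lemma foldr_reset_spec (other : Char) :
    ∀ L : List (Char × Int),
      L.foldr (fun cv sb => if cv.1 = other then ((0 : Int), cv.2) else (sb.1 + cv.2, sb.2))
          ((0 : Int), (0 : Int)) =
        (((L.map Prod.snd).take (L.findIdx (fun cv => cv.1 = other))).sum,
         if L.findIdx (fun cv => cv.1 = other) < L.length
         then (L.map Prod.snd).getD (L.findIdx (fun cv => cv.1 = other)) 0 else 0) := by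
  intro L
  induction L with
  | nil => simp
  | cons cv t ih =>
    by_cases h : cv.1 = other
    · simp [List.findIdx_cons, h, List.getD]
    · have hIdx : ((cv :: t).findIdx (fun cv => cv.1 = other)) = t.findIdx (fun cv => cv.1 = other) + 1 := by
        simp [List.findIdx_cons, h]
      rw [List.foldr_cons, ih, if_neg h, hIdx, Prod.mk.injEq]
      constructor
      · simp only [List.map_cons, List.take_succ_cons, List.sum_cons]
        exact add_comm _ _
      · simp only [List.map_cons, List.length_cons, List.getD, List.getElem?_cons_succ]
        by_cases hlt : t.findIdx (fun cv => cv.1 = other) < t.length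
        · rw [if_pos hlt, if_pos (by omega)]
        · rw [if_neg hlt, if_neg (by omega)]

lemma map_snd_zip_eq_take : ∀ (cs : List Char) (V : List Int),
    (cs.zip V).map Prod.snd = V.take cs.length := by
  intro cs
  induction cs with
  | nil => intro V; simp
  | cons c t ih =>
    intro V
    rcases V with _ | ⟨v, vs⟩
    · simp
    · simp [ih vs]

lemma zip_findIdx_eq_min (p : Char → Bool) : ∀ (cs : List Char) (V : List Int),
    (cs.zip V).findIdx (fun cv => p cv.1) = min (cs.findIdx p) (cs.zip V).length := by
  intro cs
  induction cs with
  | nil => intro V; simp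
  | cons c t ih =>
    intro V
    rcases V with _ | ⟨v, vs⟩
    · simp
    · by_cases h : p c
      · simp [List.findIdx_cons, h]
      · simp only [List.zip_cons_cons, List.findIdx_cons, h, cond_false, List.length_cons, ih vs]
        omega

-- B's fold result in terms of cs.findIdx: sum of the leading run and the boundary value
lemma alt_fold_spec (other : Char) (cs : List Char) (V : List Int) :
    ((cs.zip V).reverse).foldl
        (fun (sb : Int × Int) cv => if cv.1 = other then ((0 : Int), cv.2) else (sb.1 + cv.2, sb.2))
        ((0 : Int), (0 : Int)) =
      ((V.take (min (cs.findIdx (· = other)) (cs.zip V).length)).sum,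
       if min (cs.findIdx (· = other)) (cs.zip V).length < (cs.zip V).length
       then V.getD (min (cs.findIdx (· = other)) (cs.zip V).length) 0 else 0) := by
  rw [List.foldl_reverse, foldr_reset_spec other (cs.zip V),
      map_snd_zip_eq_take, zip_findIdx_eq_min (fun c => c = other)]
  have hfi : cs.findIdx (fun c => c = other) = cs.findIdx (· = other) := rfl
  rw [hfi]
  set j := min (cs.findIdx (· = other)) (cs.zip V).length with hj
  have hlen : (cs.zip V).length = min cs.length V.length := List.length_zip
  have hjle : j ≤ cs.length := by omega
  have htake : (V.take cs.length).take j = V.take j := by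
    rw [List.take_take, Nat.min_eq_left hjle]
  rw [htake]
  by_cases hlt : j < (cs.zip V).length
  · have hgd : (V.take cs.length).getD j 0 = V.getD j 0 := by
      unfold List.getD
      rw [List.getElem?_take_of_lt (by omega)]
    rw [if_pos hlt, if_pos hlt, hgd]
  · rw [if_neg hlt, if_neg hlt]

-- ===== VERDICT (by name: the statement is the Claim_ definition above) =====
theorem solution_spec : Claim_equal_solution := by
  intro R V _ hpre
  obtain ⟨hne, hmin⟩ := hpre
  rcases h : R.toList with _ | ⟨c, t⟩
  · exact absurd h hne
  rw [h] at hmin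
  unfold Spec_solution solution solution_alt
  rw [h]
  simp only [List.headD_cons, List.tail_cons, List.length_cons] at hmin
  by_cases hR : R = "B"
  · -- R = "B": c = 'B', t = []
    have hB : ("B" : String).toList = ['B'] := by decide
    rw [hR, hB] at h
    obtain ⟨hc, ht⟩ : 'B' = c ∧ [] = t := by simpa using h
    subst hc; subst ht
    rw [if_pos hR]
    simp only [List.findIdx_nil, List.headD_cons] at hmin ⊢
    have hm : 1 ≤ V.length := by omega
    rcases V with _ | ⟨v, vs⟩
    · simp at hm
    · simp [List.zip]
  · rw [if_neg hR]
    by_cases hc : c = 'B'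
    · subst hc
      rw [if_pos rfl] at hmin
      simp only [List.headD_cons, List.drop_succ_cons, List.drop_zero]
      rw [pvLoop_spec, alt_fold_spec]
      simp only [if_true]
      have hft : t.findIdx (· = 'A') ≤ t.length := List.findIdx_le_length
      have hzl : (('B' :: t).zip V).length = min (t.length + 1) V.length := by
        rw [List.length_zip]; simp
      have hfi : ('B' :: t).findIdx (· = 'A') = t.findIdx (· = 'A') + 1 := by
        simp [List.findIdx_cons]
      rw [hfi]
      have hjz : min (t.findIdx (· = 'A') + 1) ((('B' :: t).zip V).length)
          = t.findIdx (· = 'A') + 1 := by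
        rw [hzl]; omega
      rw [hjz]
      have hsum : (V.take (t.findIdx (· = 'A') + 1)).sum
          = V.getD 0 0 + ((V.drop 1).take (t.findIdx (· = 'A'))).sum := by
        simpa using take_succ_sum V 0 (t.findIdx (· = 'A'))
      rw [hsum]
      refine congrArg (fun z => [V.getD 0 0 + ((V.drop 1).take (t.findIdx (· = 'A'))).sum, z]) ?_
      by_cases hlt : t.findIdx (· = 'A') < t.length
      · rw [if_pos hlt, if_pos (by rw [hzl]; omega), Nat.add_comm 1]
      · rw [if_neg hlt, if_neg (by rw [hzl]; omega)]
    · rw [if_neg hc] at hmin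
      simp only [List.headD_cons, if_neg hc]
      rw [pvLoop_spec, alt_fold_spec]
      have hft : ('B' :: t).findIdx (· = 'B') ≤ ('B' :: t).length := List.findIdx_le_length
      have hft2 : (c :: t).findIdx (· = 'B') ≤ t.length + 1 := by
        simpa using (List.findIdx_le_length (p := fun x => decide (x = 'B')) (xs := c :: t))
      have hzl : ((c :: t).zip V).length = min (t.length + 1) V.length := by
        rw [List.length_zip]; simp
      have hjz : min ((c :: t).findIdx (· = 'B')) (((c :: t).zip V).length)
          = (c :: t).findIdx (· = 'B') := by
        rw [hzl]; omega
      rw [hjz]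
      have hdrop : (V.drop 0) = V := rfl
      rw [hdrop, zero_add, Nat.zero_add]
      refine congrArg (fun z => [(0 : Int), (V.take ((c :: t).findIdx (· = 'B'))).sum + z]) ?_
      by_cases hlt : (c :: t).findIdx (· = 'B') < (c :: t).length
      · rw [if_pos hlt, if_pos (by rw [hzl]; simp only [List.length_cons] at hlt; omega)]
      · rw [if_neg hlt, if_neg (by rw [hzl]; simp only [List.length_cons] at hlt; omega)]
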